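-- pv_equiv track=rewrite | github.com/sidb95/code-problems | hackerrank/practice/game-of-stones-1.py | gameOfStones
-- ===== SOURCE A (Python) =====
-- def gameOfStones(n):
--     nums = [1, 7, 8, 14]
--     for i in range(18, 101):
--         if ((i - 18) % 4 == 0):
--             nums.append(i)
--     if n in nums:
--         return "Second"
--     else:
--         return "First"
-- ===== SOURCE B (Python) =====
-- def _on_ladder(m):
--     # recursive descent along m's own residue chain toward the ladder base 18
--     if m == 18:
--         return True
--     if m < 18 or m > 98:
--         return False
--     return _on_ladder(m - 4)
--
--
-- def gameOfStones(n):
--     if n in (1, 7, 8, 14):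
--         return "Second"
--     return "Second" if _on_ladder(n) else "First"
-- ===== Notes on version B (the rewrite author's own statement) =====
-- stated objective: alternative
-- what changed: Instead of A's building the whole exceptional list with a range loop and scanning it for n, B decides the answer by a recursive descent that walks n itself down by 4 toward the ladder base 18, touching only n's own residue chain and no precomputed collection.
import Mathlib
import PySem

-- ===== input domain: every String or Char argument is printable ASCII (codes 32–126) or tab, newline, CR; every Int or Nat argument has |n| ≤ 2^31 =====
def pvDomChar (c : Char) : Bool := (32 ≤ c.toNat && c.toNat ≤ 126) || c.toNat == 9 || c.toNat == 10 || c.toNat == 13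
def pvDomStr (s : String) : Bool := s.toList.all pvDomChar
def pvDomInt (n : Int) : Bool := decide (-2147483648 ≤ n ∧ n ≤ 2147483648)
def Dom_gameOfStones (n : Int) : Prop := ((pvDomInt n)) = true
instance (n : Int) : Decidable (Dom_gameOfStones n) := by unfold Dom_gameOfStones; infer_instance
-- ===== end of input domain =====

-- B replaces A's build-the-whole-list-then-scan with a recursive descent down n's own chain (alternative decomposition, no list built).

-- ===== PORT A =====
def gameOfStones (n : Int) : String :=
  let nums : List Int :=
    (PySem.List.pyRange 18 101 1).foldl
      (fun acc i => if PySem.Int.mod (i - 18) 4 = 0 then acc ++ [i] else acc)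
      [1, 7, 8, 14]
  if n ∈ nums then "Second" else "First"

-- ===== PORT B =====
def onLadder (m : Int) : Bool :=
  if m = 18 then true
  else if m < 18 ∨ m > 98 then false
  else onLadder (m - 4)
termination_by (m - 14).toNat
decreasing_by omega

def gameOfStones_alt (n : Int) : String :=
  if n = 1 ∨ n = 7 ∨ n = 8 ∨ n = 14 then "Second"
  else if onLadder n then "Second" else "First"

-- ===== PRECONDITION & SPEC =====
def Spec_gameOfStones (n : Int) (out : String) : Prop := out = gameOfStones_alt n
instance (n : Int) (out : String) : Decidable (Spec_gameOfStones n out) := by unfold Spec_gameOfStones; infer_instance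

-- ===== CLAIM (what is proved, stated in full; the proofs are below) =====
def Claim_equal_gameOfStones : Prop := ∀ (n : Int), Dom_gameOfStones n → Spec_gameOfStones n (gameOfStones n)

-- ===== LEMMAS AND PROOFS =====

-- A's loop produces a fixed literal list; evaluate it once.
theorem gameOfStones_nums_eval :
    (PySem.List.pyRange 18 101 1).foldl
      (fun (acc : List Int) i => if PySem.Int.mod (i - 18) 4 = 0 then acc ++ [i] else acc)
      [1, 7, 8, 14] =
    [1, 7, 8, 14, 18, 22, 26, 30, 34, 38, 42, 46, 50, 54, 58, 62, 66, 70, 74, 78,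
     82, 86, 90, 94, 98] := by decide

-- B's recursive descent reaches 18 exactly on the arithmetic ladder 18, 22, …, 98.
theorem onLadder_iff (m : Int) :
    onLadder m = true ↔ 18 ≤ m ∧ m ≤ 98 ∧ (m - 18) % 4 = 0 := by
  fun_induction onLadder m with
  | case1 => simp
  | case2 m h1 h2 => simp only [Bool.false_eq_true, false_iff]; omega
  | case3 m h1 h2 ih =>
      rw [ih]
      omega

theorem gameOfStones_cond (n : Int) :
    (n ∈ ([1, 7, 8, 14, 18, 22, 26, 30, 34, 38, 42, 46, 50, 54, 58, 62, 66, 70, 74, 78,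
      82, 86, 90, 94, 98] : List Int)) ↔
    ((n = 1 ∨ n = 7 ∨ n = 8 ∨ n = 14) ∨ onLadder n = true) := by
  rw [onLadder_iff]
  simp only [List.mem_cons, List.not_mem_nil, or_false]
  omega

-- ===== VERDICT (by name: the statement is the Claim_ definition above) =====
theorem gameOfStones_spec : Claim_equal_gameOfStones := by
  intro n _
  unfold Spec_gameOfStones gameOfStones gameOfStones_alt
  rw [gameOfStones_nums_eval]
  by_cases h4 : n = 1 ∨ n = 7 ∨ n = 8 ∨ n = 14
  · rw [if_pos ((gameOfStones_cond n).mpr (Or.inl h4)), if_pos h4]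
  · rw [if_neg h4]
    by_cases hl : onLadder n = true
    · rw [if_pos ((gameOfStones_cond n).mpr (Or.inr hl)), if_pos hl]
    · rw [if_neg fun hm => ((gameOfStones_cond n).mp hm).elim h4 hl,
          if_neg hl]
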